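-- pv_equiv track=rewrite | github.com/ShireenShamil/Search-Algorithms | job_scheduling.py | calculate_penalty
-- ===== SOURCE A (Python) =====
-- def calculate_penalty(order):
--     time = 0
--     total_penalty = 0
--     for task in order:
--         name, duration, deadline, penalty = task
--         time += duration
--         delay = max(0, time - deadline)
--         total_penalty += delay * penalty
--     return total_penalty
-- ===== SOURCE B (Python) =====
-- def calculate_penalty(order):
--     # materialize prefix completion times, then sum penalties in a second pass
--     times = []
--     t = 0
--     for _, d, _, _ in order:
--         t += d
--         times.append(t)
--     return sum(max(0, t - deadline) * penalty
--                for t, (_, _, deadline, penalty) in zip(times, order))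
-- ===== Notes on version B (the rewrite author's own statement) =====
-- stated objective: alternative
-- what changed: B splits the single state-threading loop into two passes: it first materializes the list of prefix completion times, then sums max(0, time - deadline) * penalty over the zip of that list with the tasks.
import Mathlib
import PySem

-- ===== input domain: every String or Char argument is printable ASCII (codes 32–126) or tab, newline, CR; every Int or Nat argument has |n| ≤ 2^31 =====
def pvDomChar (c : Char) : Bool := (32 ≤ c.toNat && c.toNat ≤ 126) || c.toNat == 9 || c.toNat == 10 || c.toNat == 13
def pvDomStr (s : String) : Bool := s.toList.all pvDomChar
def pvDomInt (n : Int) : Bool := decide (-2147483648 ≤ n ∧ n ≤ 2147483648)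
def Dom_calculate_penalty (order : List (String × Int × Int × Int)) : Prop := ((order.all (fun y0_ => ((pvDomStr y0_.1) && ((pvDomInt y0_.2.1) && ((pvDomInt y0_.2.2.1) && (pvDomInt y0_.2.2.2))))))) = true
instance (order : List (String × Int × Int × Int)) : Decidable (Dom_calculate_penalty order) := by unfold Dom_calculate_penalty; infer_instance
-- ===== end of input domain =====

-- B: two-pass alternative — materialize the prefix completion-time list, then sum penalties over its zip with the tasks (same O(n) cost).


-- ===== PORT A =====
def calculate_penalty (order : List (String × Int × Int × Int)) : Int :=
  (order.foldl (fun (st : Int × Int) task =>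
      let time := st.1 + task.2.1
      let delay := max 0 (time - task.2.2.1)
      (time, st.2 + delay * task.2.2.2)) (0, 0)).2

-- ===== PORT B =====
-- prefix completion times: running sums of the durations
def pvAccTimes (t : Int) : List (String × Int × Int × Int) → List Int
  | [] => []
  | task :: rest => (t + task.2.1) :: pvAccTimes (t + task.2.1) rest

def calculate_penalty_alt (order : List (String × Int × Int × Int)) : Int :=
  ((pvAccTimes 0 order).zip order).foldl
    (fun s p => s + max 0 (p.1 - p.2.2.2.1) * p.2.2.2.2) 0

-- ===== PRECONDITION & SPEC =====
def Spec_calculate_penalty (order : List (String × Int × Int × Int)) (out : Int) : Prop := out = calculate_penalty_alt order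
instance (order : List (String × Int × Int × Int)) (out : Int) : Decidable (Spec_calculate_penalty order out) := by unfold Spec_calculate_penalty; infer_instance

-- ===== CLAIM (what is proved, stated in full; the proofs are below) =====
def Claim_equal_calculate_penalty : Prop := ∀ (order : List (String × Int × Int × Int)), Dom_calculate_penalty order → Spec_calculate_penalty order (calculate_penalty order)

-- ===== LEMMAS AND PROOFS =====

-- ===== VERDICT (by name: the statement is the Claim_ definition above) =====
lemma pv_key (order : List (String × Int × Int × Int)) (t s : Int) :
    (order.foldl (fun (st : Int × Int) task =>
        let time := st.1 + task.2.1
        let delay := max 0 (time - task.2.2.1)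
        (time, st.2 + delay * task.2.2.2)) (t, s)).2
      = ((pvAccTimes t order).zip order).foldl
          (fun s p => s + max 0 (p.1 - p.2.2.2.1) * p.2.2.2.2) s := by
  induction order generalizing t s with
  | nil => simp
  | cons task rest ih =>
      simp [pvAccTimes, List.foldl, ih]

theorem calculate_penalty_spec : Claim_equal_calculate_penalty := by
  intro order _
  unfold Spec_calculate_penalty calculate_penalty calculate_penalty_alt
  exact pv_key order 0 0
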